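-- pv_equiv track=rewrite | github.com/hanwgyu/CTCI_solution | Leetcode/1937.py | maxPoints_1
-- ===== SOURCE A (Python) =====
-- from typing import List
--
-- def maxPoints_1(points: List[List[int]]) -> int:
--     M, N = len(points), len(points[0])
--     dp = [0 for _ in range(N)]
--     dp_prev = [0 for _ in range(N)]
--     for i in range(M):
--         for j in range(N):
--             dp[j] = points[i][j] + max([dp_prev[k] - abs(k-j) for k in range(N)])
--         dp_prev = dp.copy()
--     return max(dp)
-- ===== SOURCE B (Python) =====
-- from typing import List
--
-- def maxPoints_1(points: List[List[int]]) -> int: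
--     # Two directional running-max sweeps replace the O(N) inner scan per cell.
--     N = len(points[0])
--     prev = [0] * N
--     for row in points:
--         left = []
--         run = prev[0]
--         for v in prev:
--             run = max(run - 1, v)
--             left.append(run)
--         right = []
--         run = prev[-1]
--         for v in reversed(prev):
--             run = max(run - 1, v)
--             right.append(run)
--         right.reverse()
--         prev = [row[j] + max(left[j], right[j]) for j in range(N)]
--     return max(prev)
-- ===== Notes on version B (the rewrite author's own statement) =====
-- stated objective: faster
-- what changed: Replaced the O(N) inner scan max(dp_prev[k]-abs(k-j)) per cell by two directional running-max sweeps (left-to-right and right-to-left) over the previous row, turning each row update into O(N).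
import Mathlib
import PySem

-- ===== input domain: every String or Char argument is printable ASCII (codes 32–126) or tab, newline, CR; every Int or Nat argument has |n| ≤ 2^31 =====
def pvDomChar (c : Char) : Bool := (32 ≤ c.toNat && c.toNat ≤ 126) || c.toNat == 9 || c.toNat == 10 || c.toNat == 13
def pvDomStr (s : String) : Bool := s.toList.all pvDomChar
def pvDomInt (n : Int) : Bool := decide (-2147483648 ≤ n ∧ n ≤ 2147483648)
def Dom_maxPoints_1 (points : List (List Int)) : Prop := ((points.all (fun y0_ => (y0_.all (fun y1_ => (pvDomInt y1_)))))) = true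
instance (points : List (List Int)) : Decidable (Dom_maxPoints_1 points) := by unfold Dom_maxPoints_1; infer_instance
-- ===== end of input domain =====

-- B replaces A's O(N) inner scan per cell by two directional running-max sweeps per row; measurably faster.

-- ===== PORT A =====
def maxPoints_1 (points : List (List Int)) : Int :=
  let M : Int := (points.length : Int)
  let N : Int := ((PySem.List.pyGetD points 0 []).length : Int)
  let dp : List Int := (PySem.List.pyRange 0 N).map (fun _ => (0 : Int))
  let dp_prev : List Int := (PySem.List.pyRange 0 N).map (fun _ => (0 : Int))
  let st := (PySem.List.pyRange 0 M).foldl (fun (s : List Int × List Int) i =>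
      let dp' := (PySem.List.pyRange 0 N).foldl (fun d j =>
          PySem.List.pySetD d j
            (PySem.List.pyGetD (PySem.List.pyGetD points i []) j 0 +
             ((PySem.List.max? ((PySem.List.pyRange 0 N).map
                 (fun k => PySem.List.pyGetD s.2 k 0 - ((k - j).natAbs : Int)))
                 (fun x => x)).getD 0))) s.1
      (dp', dp')) (dp, dp_prev)
  ((PySem.List.max? st.1 (fun x => x)).getD 0)

-- ===== PORT B =====
-- B's left/right running-max sweep: run = max(run - 1, v); out.append(run)
def pvSweep (run : Int) : List Int → List Int
  | [] => []
  | v :: rest => max (run - 1) v :: pvSweep (max (run - 1) v) rest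

def maxPoints_1_alt (points : List (List Int)) : Int :=
  let N : Int := ((PySem.List.pyGetD points 0 []).length : Int)
  let prev0 : List Int := List.replicate N.toNat 0
  let fin := points.foldl (fun prev row =>
      let left := pvSweep (PySem.List.pyGetD prev 0 0) prev
      let right := (pvSweep (PySem.List.pyGetD prev (-1) 0) prev.reverse).reverse
      (PySem.List.pyRange 0 N).map (fun j =>
        PySem.List.pyGetD row j 0 +
          max (PySem.List.pyGetD left j 0) (PySem.List.pyGetD right j 0))) prev0
  ((PySem.List.max? fin (fun x => x)).getD 0)

-- ===== PRECONDITION & SPEC =====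
-- Pre_ excludes exactly the inputs where the Python A raises: empty points / empty first
-- row (IndexError / ValueError on max([])), and some row shorter than the first row
-- (IndexError on points[i][j]); B raises on exactly the same inputs.
def Pre_maxPoints_1 (points : List (List Int)) : Prop :=
  points ≠ [] ∧ 0 < (points.headD []).length ∧
    ∀ row ∈ points, (points.headD []).length ≤ row.length
instance (points : List (List Int)) : Decidable (Pre_maxPoints_1 points) := by
  unfold Pre_maxPoints_1; infer_instance

def pvWitness_maxPoints_1 : List (List Int) := [[1, 2, 3], [-1, 5, 0]]

def Spec_maxPoints_1 (points : List (List Int)) (out : Int) : Prop := out = maxPoints_1_alt points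
instance (points : List (List Int)) (out : Int) : Decidable (Spec_maxPoints_1 points out) := by unfold Spec_maxPoints_1; infer_instance

-- ===== CLAIM (what is proved, stated in full; the proofs are below) =====
def Claim_equal_maxPoints_1 : Prop := ∀ (points : List (List Int)), Dom_maxPoints_1 points → Pre_maxPoints_1 points → Spec_maxPoints_1 points (maxPoints_1 points)

-- ===== LEMMAS AND PROOFS =====

theorem pvSweep_length (run : Int) (l : List Int) : (pvSweep run l).length = l.length := by
  induction l generalizing run with
  | nil => rfl
  | cons v rest ih => simp [pvSweep, ih]

theorem pyGetD_toNat (xs : List Int) (i : Int) (h : 0 ≤ i) :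
    PySem.List.pyGetD xs i 0 = xs.getD i.toNat 0 := by
  simp [PySem.List.pyGetD, PySem.List.pyGet?_of_nonneg xs h, List.getD]

-- the running value contributes run - (j+1) at position j
theorem pvSweep_ge_run (run : Int) (l : List Int) (j : Nat) (hj : j < l.length) :
    run - ((j : Int) + 1) ≤ (pvSweep run l).getD j 0 := by
  induction l generalizing run j with
  | nil => simp at hj
  | cons v rest ih =>
    cases j with
    | zero =>
      simp only [pvSweep, List.getD_cons_zero]
      have := le_max_left (run - 1) v
      omega
    | succ j =>
      simp only [pvSweep, List.getD_cons_succ]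
      have h1 := ih (max (run - 1) v) j (by simpa using hj)
      have h2 : run - 1 ≤ max (run - 1) v := le_max_left _ _
      push_cast at h1 ⊢
      omega

theorem pvSweep_ge (run : Int) (l : List Int) (k j : Nat) (hk : k ≤ j) (hj : j < l.length) :
    l.getD k 0 - ((j : Int) - k) ≤ (pvSweep run l).getD j 0 := by
  induction l generalizing run k j with
  | nil => simp at hj
  | cons v rest ih =>
    cases j with
    | zero =>
      have hk0 : k = 0 := by omega
      subst hk0
      simp only [pvSweep, List.getD_cons_zero]
      have := le_max_right (run - 1) v
      push_cast
      omega
    | succ j =>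
      simp only [pvSweep, List.getD_cons_succ]
      cases k with
      | zero =>
        have h1 := pvSweep_ge_run (max (run - 1) v) rest j (by simpa using hj)
        have h2 : v ≤ max (run - 1) v := le_max_right _ _
        simp only [List.getD_cons_zero]
        push_cast
        omega
      | succ k =>
        have h1 := ih (max (run - 1) v) k j (by omega) (by simpa using hj)
        simp only [List.getD_cons_succ]
        push_cast at h1 ⊢
        omega

theorem pvSweep_attained (run : Int) (l : List Int) (j : Nat) (hj : j < l.length) :
    (pvSweep run l).getD j 0 = run - ((j : Int) + 1) ∨
      ∃ k, k ≤ j ∧ (pvSweep run l).getD j 0 = l.getD k 0 - ((j : Int) - k) := by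
  induction l generalizing run j with
  | nil => simp at hj
  | cons v rest ih =>
    cases j with
    | zero =>
      rcases max_cases (run - 1) v with ⟨h, _⟩ | ⟨h, _⟩
      · left
        simp only [pvSweep, List.getD_cons_zero, h]
        push_cast; ring
      · right
        refine ⟨0, le_refl 0, ?_⟩
        simp only [pvSweep, List.getD_cons_zero, h]
        push_cast; ring
    | succ j =>
      simp only [pvSweep, List.getD_cons_succ]
      rcases ih (max (run - 1) v) j (by simpa using hj) with h | ⟨k, hk, h⟩
      · rcases max_cases (run - 1) v with ⟨hm, _⟩ | ⟨hm, _⟩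
        · left
          rw [h, hm]; push_cast; ring
        · right
          refine ⟨0, by omega, ?_⟩
          rw [h, hm]
          simp only [List.getD_cons_zero]
          push_cast; ring
      · right
        refine ⟨k + 1, by omega, ?_⟩
        rw [h]
        simp only [List.getD_cons_succ]
        push_cast; ring

-- A's inner comprehension list at column j
def pvCand (prev : List Int) (j : Int) : List Int :=
  (PySem.List.pyRange 0 (prev.length : Int)).map
    (fun k => PySem.List.pyGetD prev k 0 - ((k - j).natAbs : Int))

theorem pvCand_mem (prev : List Int) (j : Int) (k : Nat) (hk : k < prev.length) :
    prev.getD k 0 - (((k : Int) - j).natAbs : Int) ∈ pvCand prev j := by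
  refine List.mem_map.2 ⟨(k : Int), ?_, by simp⟩
  exact PySem.List.mem_pyRange_one.2 ⟨by positivity, by exact_mod_cast hk⟩

-- key pointwise lemma: B's max of the two sweeps equals A's max over the comprehension
theorem pvKey (prev : List Int) (n j : Nat) (hp : prev.length = n) (hn : 0 < n) (hj : j < n) :
    max ((pvSweep (PySem.List.pyGetD prev 0 0) prev).getD j 0)
        (((pvSweep (PySem.List.pyGetD prev (-1) 0) prev.reverse).reverse).getD j 0) =
      ((PySem.List.max? (pvCand prev (j : Int)) (fun x => x)).getD 0) := by
  have hne : prev ≠ [] := by cases prev <;> simp_all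
  have h0 : PySem.List.pyGetD prev 0 0 = prev.getD 0 0 := by
    simpa using PySem.List.pyGetD_natCast (xs := prev) (n := 0) (d := 0)
  have hrevlen : prev.reverse.length = n := by simp [hp]
  have hrevgetD : ∀ k : Nat, k < n → prev.reverse.getD k 0 = prev.getD (n - 1 - k) 0 := by
    intro k hk
    rw [List.getD_eq_getElem _ _ (by rw [hrevlen]; omega),
        List.getD_eq_getElem _ _ (by rw [hp]; omega), List.getElem_reverse]
    congr 1
    omega
  have hlastD : PySem.List.pyGetD prev (-1) 0 = prev.reverse.getD 0 0 := by
    rw [PySem.List.pyGetD_neg_one prev 0 hne, List.getLast_eq_head_reverse,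
        List.head_eq_getElem, List.getD_eq_getElem _ _ (by rw [hrevlen]; omega)]
  have hrightD : ((pvSweep (PySem.List.pyGetD prev (-1) 0) prev.reverse).reverse).getD j 0 =
      (pvSweep (PySem.List.pyGetD prev (-1) 0) prev.reverse).getD (n - 1 - j) 0 := by
    have hlen : (pvSweep (PySem.List.pyGetD prev (-1) 0) prev.reverse).length = n := by
      rw [pvSweep_length, hrevlen]
    rw [List.getD_eq_getElem _ _ (by simp [hlen]; omega),
        List.getD_eq_getElem _ _ (by rw [hlen]; omega)]
    rw [List.getElem_reverse]
    congr 1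
    rw [hlen]
  obtain ⟨m, hm⟩ : ∃ m, PySem.List.max? (pvCand prev (j : Int)) (fun x => x) = some m := by
    cases h : PySem.List.max? (pvCand prev (j : Int)) (fun x => x) with
    | none =>
      exfalso
      have hnil := (PySem.List.max?_eq_none_iff _ _).1 h
      have hmem := pvCand_mem prev (j : Int) 0 (by omega)
      rw [hnil] at hmem
      simp at hmem
    | some m => exact ⟨m, rfl⟩
  rw [hm]
  simp only [Option.getD_some]
  have hub : ∀ y ∈ pvCand prev (j : Int), y ≤ m := PySem.List.max?_isMax hm
  have hmemm : m ∈ pvCand prev (j : Int) := PySem.List.max?_mem hm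
  apply le_antisymm
  · apply max_le
    · -- the left sweep is ≤ m
      rcases pvSweep_attained (PySem.List.pyGetD prev 0 0) prev j (by omega) with h | ⟨k, hk, h⟩
      · have hb := hub _ (pvCand_mem prev (j : Int) 0 (by omega))
        omega
      · have hb := hub _ (pvCand_mem prev (j : Int) k (by omega))
        omega
    · -- the right sweep is ≤ m
      rw [hrightD]
      rcases pvSweep_attained (PySem.List.pyGetD prev (-1) 0) prev.reverse (n - 1 - j)
          (by rw [hrevlen]; omega) with h | ⟨k, hk, h⟩
      · have h00 := hrevgetD 0 (by omega)
        simp only [Nat.sub_zero] at h00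
        have hb := hub _ (pvCand_mem prev (j : Int) (n - 1) (by omega))
        omega
      · have hrk := hrevgetD k (by omega)
        have hb := hub _ (pvCand_mem prev (j : Int) (n - 1 - k) (by omega))
        omega
  · -- m ≤ max of the two sweeps
    simp only [pvCand] at hmemm
    obtain ⟨kk, hkk, hmk⟩ := List.mem_map.1 hmemm
    obtain ⟨hk0, hkn⟩ := PySem.List.mem_pyRange_one.1 hkk
    have hgd : PySem.List.pyGetD prev kk 0 = prev.getD kk.toNat 0 := pyGetD_toNat prev kk hk0
    rw [hgd] at hmk
    by_cases hcmp : kk.toNat ≤ j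
    · have hle := pvSweep_ge (PySem.List.pyGetD prev 0 0) prev kk.toNat j hcmp (by omega)
      have hmax := le_max_left ((pvSweep (PySem.List.pyGetD prev 0 0) prev).getD j 0)
        (((pvSweep (PySem.List.pyGetD prev (-1) 0) prev.reverse).reverse).getD j 0)
      omega
    · have hle := pvSweep_ge (PySem.List.pyGetD prev (-1) 0) prev.reverse
        (n - 1 - kk.toNat) (n - 1 - j) (by omega) (by rw [hrevlen]; omega)
      rw [hrevgetD (n - 1 - kk.toNat) (by omega)] at hle
      have hidx : n - 1 - (n - 1 - kk.toNat) = kk.toNat := by omega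
      rw [hidx] at hle
      have hmax := le_max_right ((pvSweep (PySem.List.pyGetD prev 0 0) prev).getD j 0)
        (((pvSweep (PySem.List.pyGetD prev (-1) 0) prev.reverse).reverse).getD j 0)
      omega

-- A's in-place assignment loop over j writes every position exactly once: it is a map
theorem pvFoldl_pySetD (f : Int → Int) (n : Nat) :
    ∀ (m : Nat), m ≤ n → ∀ d : List Int, d.length = n →
      (PySem.List.pyRange 0 (m : Int)).foldl (fun d j => PySem.List.pySetD d j (f j)) d =
        (PySem.List.pyRange 0 (m : Int)).map f ++ d.drop m := by
  intro m
  induction m with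
  | zero => intro _ d _; simp
  | succ m ih =>
    intro hm d hd
    have hcast : ((m + 1 : Nat) : Int) = (m : Int) + 1 := by push_cast; ring
    rw [hcast, PySem.List.pyRange_one_succ_right (by positivity)]
    rw [List.foldl_append, List.map_append, ih (by omega) d hd]
    simp only [List.foldl_cons, List.foldl_nil, List.map_cons, List.map_nil]
    have hlen : ((PySem.List.pyRange 0 (m : Int)).map f).length = m := by simp
    have hmlen : m < ((PySem.List.pyRange 0 (m : Int)).map f ++ d.drop m).length := by
      simp [hlen, hd]; omega
    have hdrop : d.drop m = d[m]'(by omega) :: d.drop (m + 1) :=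
      List.drop_eq_getElem_cons (by omega)
    simp only [PySem.List.pySetD, PySem.List.pySet?, PySem.List.pyIdx?]
    rw [if_pos (by positivity), if_pos (by exact_mod_cast hmlen)]
    simp only [Int.toNat_natCast, Option.map_some, Option.getD_some]
    rw [hdrop, List.set_append, hlen]
    simp
    rw [hdrop, List.set_cons_zero]

-- B's step function, as it appears in the port
def pvStepB (N : Int) (prev row : List Int) : List Int :=
  (PySem.List.pyRange 0 N).map (fun j =>
    PySem.List.pyGetD row j 0 +
      max (PySem.List.pyGetD (pvSweep (PySem.List.pyGetD prev 0 0) prev) j 0)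
          (PySem.List.pyGetD ((pvSweep (PySem.List.pyGetD prev (-1) 0) prev.reverse).reverse) j 0))

theorem pvStepB_length (n : Nat) (prev row : List Int) :
    (pvStepB (n : Int) prev row).length = n := by
  simp [pvStepB]

-- one row of A equals one row of B, for a previous row of the right length
theorem pvStep_eq (n : Nat) (hn : 0 < n) (prev row : List Int) (hp : prev.length = n) :
    (PySem.List.pyRange 0 (n : Int)).foldl (fun d j =>
        PySem.List.pySetD d j
          (PySem.List.pyGetD row j 0 +
           ((PySem.List.max? ((PySem.List.pyRange 0 (n : Int)).map
               (fun k => PySem.List.pyGetD prev k 0 - ((k - j).natAbs : Int)))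
               (fun x => x)).getD 0))) prev =
      pvStepB (n : Int) prev row := by
  rw [pvFoldl_pySetD _ n n (le_refl n) prev hp]
  rw [List.drop_eq_nil_of_le (by omega), List.append_nil]
  unfold pvStepB
  apply List.map_congr_left
  intro j hj
  obtain ⟨hj0, hjn⟩ := PySem.List.mem_pyRange_one.1 hj
  congr 1
  have hc : (PySem.List.pyRange 0 (n : Int)).map
      (fun k => PySem.List.pyGetD prev k 0 - ((k - j).natAbs : Int)) = pvCand prev j := by
    unfold pvCand
    rw [hp]
  rw [hc]
  have hjnat : ((j.toNat : Nat) : Int) = j := by omega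
  have hkey := pvKey prev n j.toNat hp hn (by omega)
  rw [hjnat] at hkey
  rw [← hkey]
  rw [pyGetD_toNat _ _ hj0, pyGetD_toNat _ _ hj0]

-- the paired outer loop of A runs B's fold in both components
theorem pvFold_pair (n : Nat) (hn : 0 < n) (rows : List (List Int)) :
    ∀ p : List Int, p.length = n →
      (rows.foldl (fun (s : List Int × List Int) row =>
          ((PySem.List.pyRange 0 (n : Int)).foldl (fun d j =>
            PySem.List.pySetD d j
              (PySem.List.pyGetD row j 0 +
               ((PySem.List.max? ((PySem.List.pyRange 0 (n : Int)).map
                   (fun k => PySem.List.pyGetD s.2 k 0 - ((k - j).natAbs : Int)))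
                   (fun x => x)).getD 0))) s.1,
           (PySem.List.pyRange 0 (n : Int)).foldl (fun d j =>
            PySem.List.pySetD d j
              (PySem.List.pyGetD row j 0 +
               ((PySem.List.max? ((PySem.List.pyRange 0 (n : Int)).map
                   (fun k => PySem.List.pyGetD s.2 k 0 - ((k - j).natAbs : Int)))
                   (fun x => x)).getD 0))) s.1)) (p, p)).1 =
        rows.foldl (fun prev row => pvStepB (n : Int) prev row) p := by
  induction rows with
  | nil => intro p _; rfl
  | cons row rest ih =>
    intro p hp
    simp only [List.foldl_cons]
    rw [pvStep_eq n hn p row hp]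
    exact ih (pvStepB (n : Int) p row) (pvStepB_length n p row)

-- ===== VERDICT (by name: the statement is the Claim_ definition above) =====
theorem maxPoints_1_spec : Claim_equal_maxPoints_1 := by
  intro points _hdom hpre
  obtain ⟨hne, hn, _hrows⟩ := hpre
  unfold Spec_maxPoints_1 maxPoints_1 maxPoints_1_alt
  obtain ⟨h, t, rfl⟩ : ∃ h t, points = h :: t := by
    cases points with
    | nil => exact absurd rfl hne
    | cons h t => exact ⟨h, t, rfl⟩
  simp only [List.headD_cons] at hn
  have hget0 : PySem.List.pyGetD (h :: t) 0 [] = h := by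
    simp [PySem.List.pyGetD_zero_cons]
  simp only [hget0]
  have hinit : (PySem.List.pyRange 0 (h.length : Int)).map (fun _ => (0 : Int)) =
      List.replicate ((h.length : Int)).toNat (0 : Int) := by
    rw [List.map_const']
    simp
  rw [PySem.List.foldl_pyRange_zero_pyGetD' (h :: t) []
    (fun (s : List Int × List Int) row =>
      ((PySem.List.pyRange 0 (h.length : Int)).foldl (fun d j =>
          PySem.List.pySetD d j
            (PySem.List.pyGetD row j 0 +
             ((PySem.List.max? ((PySem.List.pyRange 0 (h.length : Int)).map
                 (fun k => PySem.List.pyGetD s.2 k 0 - ((k - j).natAbs : Int)))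
                 (fun x => x)).getD 0))) s.1,
       (PySem.List.pyRange 0 (h.length : Int)).foldl (fun d j =>
          PySem.List.pySetD d j
            (PySem.List.pyGetD row j 0 +
             ((PySem.List.max? ((PySem.List.pyRange 0 (h.length : Int)).map
                 (fun k => PySem.List.pyGetD s.2 k 0 - ((k - j).natAbs : Int)))
                 (fun x => x)).getD 0))) s.1))]
  rw [← hinit]
  have hlen : ((PySem.List.pyRange 0 (h.length : Int)).map (fun _ => (0 : Int))).length
      = h.length := by simp
  rw [pvFold_pair h.length hn (h :: t) _ hlen]
  simp only [pvStepB]
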